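-- pv_equiv track=rewrite | github.com/MuzNocci/Interviews--Challenges | Nasajon/PalindromeCreator/PalindromeCreator.py | PalindromeCreator
-- ===== SOURCE A (Python) =====
-- def PalindromeCreator(strParam:str) -> str:  # Palindromo ou Not possible
--
--
--     result = ''
--     rest = ''
--     strParamInvert = strParam[::-1]
--
--     while len(strParam) > 0:
--
--         if not strParam[0] == strParamInvert[0]:
--             result += strParam[0]
--             strParam = strParam[1::]
--             strParamInvert = strParamInvert[:-1:]
--         else:
--             rest += strParam[0]
--             strParam = strParam[1::][:-1:]
--             strParamInvert = strParamInvert[1::][:-1:]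
--
--
--     return 'Not possible' if result == '' or len(rest) < 3 else result
-- ===== SOURCE B (Python) =====
-- def PalindromeCreator(strParam: str) -> str:
--     # O(n) two-pointer scan over indices; no string slicing.
--     result = []
--     rest = []
--     l, r = 0, len(strParam) - 1
--     while l <= r:
--         if strParam[l] != strParam[r]:
--             result.append(strParam[l])
--             l += 1
--         else:
--             rest.append(strParam[l])
--             l += 1
--             r -= 1
--     res = ''.join(result)
--     return 'Not possible' if res == '' or len(rest) < 3 else res
-- ===== Notes on version B (the rewrite author's own statement) =====
-- stated objective: faster
-- what changed: A repeatedly slices and rebuilds both the string and its reverse each iteration; B keeps the string fixed and moves two integer index pointers l/r, appending chars to lists and joining once.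
import Mathlib
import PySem

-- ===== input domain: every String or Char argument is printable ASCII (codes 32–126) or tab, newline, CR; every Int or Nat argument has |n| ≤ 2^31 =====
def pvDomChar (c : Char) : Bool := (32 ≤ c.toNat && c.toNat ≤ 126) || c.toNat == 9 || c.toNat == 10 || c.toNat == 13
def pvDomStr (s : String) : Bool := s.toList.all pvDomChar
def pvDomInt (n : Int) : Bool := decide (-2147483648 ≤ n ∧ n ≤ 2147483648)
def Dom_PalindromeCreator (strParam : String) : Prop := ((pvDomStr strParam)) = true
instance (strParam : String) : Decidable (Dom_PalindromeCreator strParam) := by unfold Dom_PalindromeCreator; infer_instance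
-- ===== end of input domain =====

-- B replaces A's quadratic slice-and-rebuild loop by an O(n) two-pointer index scan (objective: faster).

-- ===== PORT A =====
-- A's while loop: strParam (sp) and strParamInvert (inv) shrink by slicing each turn.
-- The '| _, _' default covers inv = [] with sp nonempty, which Python never reaches
-- (both strings always have equal length, so strParamInvert[0] never raises).
def pcLoopA (sp inv result rest : List Char) : List Char × List Char :=
  match sp, inv with
  | c :: t, d :: u =>
    if ¬ (c = d) then
      -- result += sp[0]; sp = sp[1:]; inv = inv[:-1]
      pcLoopA t ((d :: u).dropLast) (result ++ [c]) rest
    else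
      -- rest += sp[0]; sp = sp[1:][:-1]; inv = inv[1:][:-1]
      pcLoopA t.dropLast u.dropLast result (rest ++ [c])
  | _, _ => (result, rest)
termination_by sp.length
decreasing_by
  all_goals simp [List.length_dropLast]

def PalindromeCreator (strParam : String) : String :=
  let p := pcLoopA strParam.toList strParam.toList.reverse [] []
  if p.1 = [] ∨ p.2.length < 3 then "Not possible" else String.ofList p.1

-- ===== PORT B =====
-- B's while loop: two index pointers l, r into the fixed string.
-- pyGet? never returns none here (0 ≤ l ≤ r < s.length throughout); the default
-- branch is unreachable.
def pcLoopB (s : List Char) (l r : Int) (result rest : List Char) : List Char × List Char :=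
  if _h : l ≤ r then
    match PySem.List.pyGet? s l, PySem.List.pyGet? s r with
    | some cl, some cr =>
      if ¬ (cl = cr) then
        pcLoopB s (l + 1) r (result ++ [cl]) rest
      else
        pcLoopB s (l + 1) (r - 1) result (rest ++ [cl])
    | _, _ => (result, rest)
  else (result, rest)
termination_by (r + 1 - l).toNat
decreasing_by
  · exact (Int.toNat_lt_toNat (Int.sub_pos.mpr (Int.lt_add_one_of_le _h))).mpr
      (sub_lt_sub_left (lt_add_one l) (r + 1))
  · refine (Int.toNat_lt_toNat (Int.sub_pos.mpr (Int.lt_add_one_of_le _h))).mpr ?_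
    rw [Int.sub_add_cancel]
    exact lt_of_lt_of_le (sub_lt_sub_left (lt_add_one l) r)
      (sub_le_sub_right (le_of_lt (lt_add_one r)) l)

def PalindromeCreator_alt (strParam : String) : String :=
  let s := strParam.toList
  let p := pcLoopB s 0 ((s.length : Int) - 1) [] []
  let res := String.ofList p.1
  if res = "" ∨ p.2.length < 3 then "Not possible" else res

-- ===== PRECONDITION & SPEC =====
def Spec_PalindromeCreator (strParam : String) (out : String) : Prop := out = PalindromeCreator_alt strParam
instance (strParam : String) (out : String) : Decidable (Spec_PalindromeCreator strParam out) := by unfold Spec_PalindromeCreator; infer_instance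

-- ===== CLAIM (what is proved, stated in full; the proofs are below) =====
def Claim_equal_PalindromeCreator : Prop := ∀ (strParam : String), Dom_PalindromeCreator strParam → Spec_PalindromeCreator strParam (PalindromeCreator strParam)

-- ===== LEMMAS AND PROOFS =====

lemma rev_dropLast (xs : List Char) : xs.reverse.dropLast = xs.tail.reverse := by
  cases xs with
  | nil => simp
  | cons a as => simp

lemma tail_dropLast_cons (c : Char) (t : List Char) :
    ((c :: t).dropLast).tail = t.dropLast := by
  cases t <;> simp

lemma rev_as_cons (w : List Char) (h : w ≠ []) :
    w.reverse = w.getLast h :: w.dropLast.reverse := by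
  conv_lhs => rw [← List.dropLast_append_getLast h]
  rw [List.reverse_append]; simp

lemma loop_eq (n : Nat) : ∀ (w : List Char), w.length = n →
    ∀ (s : List Char) (l r : Int) (res rest : List Char),
    0 ≤ l → r < s.length →
    w.length = (r + 1 - l).toNat →
    (∀ i : Nat, i < w.length → w[i]? = s[i + l.toNat]?) →
    pcLoopA w w.reverse res rest = pcLoopB s l r res rest := by
  induction n using Nat.strong_induction_on with
  | _ n ih =>
    intro w hw s l r res rest hl hr H1 H2
    cases w with
    | nil =>
      have hlr : ¬ l ≤ r := by simp at H1; omega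
      rw [pcLoopA.eq_def, pcLoopB.eq_def]
      simp [hlr]
    | cons c t =>
      have hlr : l ≤ r := by simp at H1; omega
      have hne : (c :: t) ≠ [] := by simp
      have hrev := rev_as_cons (c :: t) hne
      set d := (c :: t).getLast hne with hd
      have hgl : PySem.List.pyGet? s l = some c := by
        have h0 := H2 0 (by simp)
        rw [PySem.List.pyGet?_of_nonneg s hl]
        simpa using h0.symm
      have hgr : PySem.List.pyGet? s r = some d := by
        have hi := H2 ((c :: t).length - 1) (by simp)
        have hlast : (c :: t)[(c :: t).length - 1]? = some d := by
          rw [← List.getLast?_eq_getElem?]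
          exact List.getLast?_eq_some_getLast hne
        have hr0 : (0:Int) ≤ r := by omega
        have hidx : (c :: t).length - 1 + l.toNat = r.toNat := by
          simp only [List.length_cons] at H1 ⊢
          omega
        rw [PySem.List.pyGet?_of_nonneg s hr0, ← hidx, ← hi, hlast]
      rw [hrev, pcLoopA.eq_def, pcLoopB.eq_def]
      simp only [hlr, dif_pos, hgl, hgr]
      by_cases hcd : c = d
      · simp only [if_neg (not_not_intro hcd)]
        have e1 : ((c :: t).dropLast.reverse).dropLast = (t.dropLast).reverse := by
          rw [rev_dropLast, tail_dropLast_cons]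
        rw [e1]
        apply ih t.dropLast.length (by simp only [hw.symm, List.length_cons, List.length_dropLast]; omega) _ rfl
        · omega
        · omega
        · simp only [List.length_cons] at H1
          simp only [List.length_dropLast]
          omega
        · intro i hi
          simp only [List.length_dropLast] at hi
          have h2 := H2 (i + 1) (by simp only [List.length_cons]; omega)
          simp only [List.getElem?_cons_succ] at h2
          rw [List.getElem?_dropLast, if_pos (by omega), h2]
          congr 1
          omega
      · simp only [if_pos hcd]
        have e2 : ((d :: (c :: t).dropLast.reverse)).dropLast = t.reverse := by
          rw [← hrev, rev_dropLast]
          rfl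
        rw [e2]
        apply ih t.length (by simp only [hw.symm, List.length_cons]; omega) _ rfl
        · omega
        · omega
        · simp only [List.length_cons] at H1
          omega
        · intro i hi
          have h2 := H2 (i + 1) (by simp only [List.length_cons]; omega)
          simp only [List.getElem?_cons_succ] at h2
          rw [h2]
          congr 1
          omega

lemma mk_eq_empty (a : List Char) : (String.ofList a = "") ↔ a = [] := by
  constructor
  · intro h
    have := congrArg String.toList h
    simpa using this
  · intro h; rw [h]

-- ===== VERDICT (by name: the statement is the Claim_ definition above) =====
theorem PalindromeCreator_spec : Claim_equal_PalindromeCreator := by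
  intro s _
  unfold Spec_PalindromeCreator PalindromeCreator PalindromeCreator_alt
  have h := loop_eq s.toList.length s.toList rfl s.toList 0 ((s.toList.length : Int) - 1)
      [] [] (le_refl 0) (by omega)
      (by omega)
      (by intro i hi; simp)
  simp only [h, mk_eq_empty]
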